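-- pv_equiv track=rewrite | github.com/mhaefner-chem/PerovGen | perovgen.py | check_inversion
-- ===== SOURCE A (Python) =====
-- def check_inversion(string)  :
--     triple_string = string*3
--
--     lstr = len(string)
--
--     k = 0
--     invs = []
--     for i in range(lstr,lstr*2):
--         k += 1
--         fw  = triple_string[i+1:i+lstr]
--         obw = triple_string[i-lstr+2:i+1]
--         bw  = triple_string[i-lstr+1:i]
--         bw  = bw[::-1]
--         obw = obw[::-1]
--
--
--         if fw == bw:
--             if 2*k < lstr*2:
--                 invs.append(2*k)
--             else:
--                 invs.append(2*k-lstr*2)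
--         if fw == obw:
--             if 2*k+1 < lstr*2:
--                 invs.append(2*k+1)
--             else:
--                 invs.append(2*k+1-lstr*2)
--
--     return invs
-- ===== SOURCE B (Python) =====
-- def check_inversion(string):
--     # an inversion axis about half-position a exists iff the string equals the
--     # rotation of its reverse by d = (-1 - a) mod n; occ[d] tabulates all such d
--     n = len(string)
--     dd = string[::-1] * 2
--     occ = [dd[d:d+n] == string for d in range(n)]
--     invs = []
--     for c in range(n):
--         if occ[(n - 1 - 2*c) % n]:
--             invs.append((2*c + 2) % (2*n))
--         if occ[(n - 2 - 2*c) % n]: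
--             invs.append((2*c + 3) % (2*n))
--     return invs
-- ===== Notes on version B (the rewrite author's own statement) =====
-- stated objective: faster
-- what changed: B replaces A's per-axis triple-string slicing/reversal comparisons by one precomputed occurrence table occ[d] = (reversed string doubled)[d:d+n] == string (an axis exists iff the string equals a rotation of its reverse), so each axis becomes a single table lookup via modular arithmetic.
import Mathlib
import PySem

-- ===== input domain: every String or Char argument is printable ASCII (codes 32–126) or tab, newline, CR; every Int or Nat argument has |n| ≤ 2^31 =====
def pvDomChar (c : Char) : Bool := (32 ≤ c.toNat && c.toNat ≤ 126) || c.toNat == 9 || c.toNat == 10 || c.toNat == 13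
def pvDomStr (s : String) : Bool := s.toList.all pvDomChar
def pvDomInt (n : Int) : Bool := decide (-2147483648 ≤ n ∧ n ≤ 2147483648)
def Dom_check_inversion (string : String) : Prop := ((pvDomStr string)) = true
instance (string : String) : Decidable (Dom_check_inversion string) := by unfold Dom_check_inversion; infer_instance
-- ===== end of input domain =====

-- B replaces A's per-axis triple-string slicing/reversal by one precomputed rotation-of-reverse
-- occurrence table plus modular-arithmetic lookups (objective: faster, measured constant-factor).

-- ===== PORT A =====
def check_inversion (string : String) : List Int :=
  let s := string.toList
  let triple_string := s ++ s ++ s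
  let lstr : Int := (s.length : Int)
  ((PySem.List.pyRange lstr (lstr*2) 1).foldl (fun (st : Int × List Int) (i : Int) =>
    let k := st.1 + 1
    let fw := PySem.List.slice triple_string (some (i+1)) (some (i+lstr))
    let obw := PySem.List.slice triple_string (some (i-lstr+2)) (some (i+1))
    let bw := PySem.List.slice triple_string (some (i-lstr+1)) (some i)
    let bw := bw.reverse     -- bw[::-1]  (PySem.List.slice?_none_none_neg_one)
    let obw := obw.reverse   -- obw[::-1]
    let invs := if fw = bw then
        st.2 ++ [if 2*k < lstr*2 then 2*k else 2*k - lstr*2]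
      else st.2
    let invs := if fw = obw then
        invs ++ [if 2*k+1 < lstr*2 then 2*k+1 else 2*k+1 - lstr*2]
      else invs
    (k, invs)) ((0 : Int), ([] : List Int))).2

-- ===== PORT B =====
def check_inversion_alt (string : String) : List Int :=
  let s := string.toList
  let n : Int := (s.length : Int)
  let dd := s.reverse ++ s.reverse       -- string[::-1] * 2
  let occ := (PySem.List.pyRange 0 n 1).map (fun d =>
    PySem.List.slice dd (some d) (some (d + n)) == s)
  (PySem.List.pyRange 0 n 1).foldl (fun invs c =>
    let invs := if PySem.List.pyGetD occ (PySem.Int.mod (n - 1 - 2*c) n) false then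
        invs ++ [PySem.Int.mod (2*c + 2) (2*n)] else invs
    if PySem.List.pyGetD occ (PySem.Int.mod (n - 2 - 2*c) n) false then
        invs ++ [PySem.Int.mod (2*c + 3) (2*n)] else invs) []

-- ===== PRECONDITION & SPEC =====
def Spec_check_inversion (string : String) (out : List Int) : Prop := out = check_inversion_alt string
instance (string : String) (out : List Int) : Decidable (Spec_check_inversion string out) := by unfold Spec_check_inversion; infer_instance

-- ===== CLAIM (what is proved, stated in full; the proofs are below) =====
def Claim_equal_check_inversion : Prop := ∀ (string : String), Dom_check_inversion string → Spec_check_inversion string (check_inversion string)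

-- ===== LEMMAS AND PROOFS =====

-- per-step emission of A's loop body at step t (so i = N + t), with incoming counter k0
def emitA' (s : List Char) (t : Nat) (k0 : Int) : List Int :=
  let n : Int := (s.length : Int)
  let i : Int := n + (t : Int)
  let k : Int := k0 + 1
  let triple_string := s ++ s ++ s
  let fw := PySem.List.slice triple_string (some (i+1)) (some (i+n))
  let obw := (PySem.List.slice triple_string (some (i-n+2)) (some (i+1))).reverse
  let bw := (PySem.List.slice triple_string (some (i-n+1)) (some i)).reverse
  (if fw = bw then [if 2*k < n*2 then 2*k else 2*k - n*2] else []) ++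
  (if fw = obw then [if 2*k+1 < n*2 then 2*k+1 else 2*k+1 - n*2] else [])

def emitA (s : List Char) (t : Nat) : List Int := emitA' s t (t : Int)

-- B's precomputed occurrence table: occ[d] ↔ the reverse rotated by d equals the string
def occList (s : List Char) : List Bool :=
  (PySem.List.pyRange 0 (s.length : Int) 1).map (fun d =>
    PySem.List.slice (s.reverse ++ s.reverse) (some d) (some (d + (s.length : Int))) == s)

-- per-step emission of B's loop body at center c, for a given occurrence table
def emitB (s : List Char) (occ : List Bool) (c : Int) : List Int :=
  let n : Int := (s.length : Int)
  (if PySem.List.pyGetD occ (PySem.Int.mod (n - 1 - 2*c) n) false then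
      [PySem.Int.mod (2*c + 2) (2*n)] else []) ++
  (if PySem.List.pyGetD occ (PySem.Int.mod (n - 2 - 2*c) n) false then
      [PySem.Int.mod (2*c + 3) (2*n)] else [])

lemma foldA_loop (f : Nat → Int → List Int) (m : Nat) (k0 : Int) (acc : List Int) :
    (List.range m).foldl (fun (st : Int × List Int) t => (st.1 + 1, st.2 ++ f t st.1)) (k0, acc)
      = (k0 + m, acc ++ (List.range m).flatMap (fun t => f t (k0 + t))) := by
  induction m generalizing acc with
  | zero => simp
  | succ m ih =>
    rw [List.range_succ, List.foldl_append, ih]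
    simp only [List.foldl_cons, List.foldl_nil, List.flatMap_append, List.flatMap_cons, List.flatMap_nil]
    refine Prod.ext ?_ ?_ <;> simp
    ring

lemma bodyA_eq (s : List Char) (st : Int × List Int) (t : Nat) :
    (let k := st.1 + 1
     let fw := PySem.List.slice (s ++ s ++ s) (some (((s.length : Int) + (t : Int))+1)) (some (((s.length : Int) + (t : Int))+(s.length : Int)))
     let obw := PySem.List.slice (s ++ s ++ s) (some (((s.length : Int) + (t : Int))-(s.length : Int)+2)) (some (((s.length : Int) + (t : Int))+1))
     let bw := PySem.List.slice (s ++ s ++ s) (some (((s.length : Int) + (t : Int))-(s.length : Int)+1)) (some ((s.length : Int) + (t : Int)))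
     let bw := bw.reverse
     let obw := obw.reverse
     let invs := if fw = bw then
         st.2 ++ [if 2*k < (s.length : Int)*2 then 2*k else 2*k - (s.length : Int)*2]
       else st.2
     let invs := if fw = obw then
         invs ++ [if 2*k+1 < (s.length : Int)*2 then 2*k+1 else 2*k+1 - (s.length : Int)*2]
       else invs
     ((k, invs) : Int × List Int))
    = (st.1 + 1, st.2 ++ emitA' s t st.1) := by
  simp only [emitA']
  split_ifs <;> simp

lemma A_eq (string : String) :
    check_inversion string = ((List.range string.toList.length).map (emitA string.toList)).flatten := by
  unfold check_inversion
  simp only []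
  have hnn : (((string.toList.length : Int))*2 - (string.toList.length : Int)).toNat
      = string.toList.length := by omega
  rw [PySem.List.pyRange_one, hnn, List.foldl_map]
  simp only [bodyA_eq]
  rw [foldA_loop]
  simp only [zero_add, List.flatMap_def]
  rfl

-- reverse of a map over `range` reads the indices backwards
lemma revmap (m : Nat) (f : Nat → Char) :
    ((List.range m).map f).reverse = (List.range m).map (fun j => f (m-1-j)) := by
  apply List.ext_getElem
  · simp
  · intro i h1 h2
    simp only [List.getElem_reverse, List.getElem_map, List.getElem_range]
    simp only [List.length_map, List.length_range]

-- a contiguous in-bounds segment as a map over its indices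
lemma seg (xs : List Char) (a m : Nat) (h : a + m ≤ xs.length) :
    (xs.drop a).take m = (List.range m).map (fun j => xs.getD (a+j) ' ') := by
  apply List.ext_getElem
  · simp; omega
  · intro i h1 h2
    have hi : i < m := by simp at h2; omega
    simp only [List.getElem_take, List.getElem_drop, List.getElem_map, List.getElem_range]
    rw [List.getD_eq_getElem?_getD, List.getElem?_eq_getElem (by omega)]
    simp

lemma segrev (xs : List Char) (a m : Nat) (h : a + m ≤ xs.length) :
    ((xs.drop a).take m).reverse = (List.range m).map (fun j => xs.getD (a+(m-1-j)) ' ') := by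
  rw [seg xs a m h, revmap]

-- indexing the tripled string is modular indexing of the string
lemma tripleGetD (s : List Char) (m : Nat) (h : m < 3*s.length) :
    (s ++ s ++ s).getD m ' ' = s.getD (m % s.length) ' ' := by
  have hN : 0 < s.length := by omega
  by_cases h1 : m < s.length
  · rw [Nat.mod_eq_of_lt h1, List.getD_append _ _ _ _ (by simp; omega), List.getD_append _ _ _ _ h1]
  · by_cases h2 : m < 2*s.length
    · rw [List.getD_append _ _ _ _ (by simp; omega),
        List.getD_append_right _ _ _ _ (by omega),
        Nat.mod_eq_sub_mod (by omega), Nat.mod_eq_of_lt (by omega)]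
    · rw [List.getD_append_right _ _ _ _ (by simp; omega),
        Nat.mod_eq_sub_mod (by omega), Nat.mod_eq_sub_mod (by omega),
        Nat.mod_eq_of_lt (by omega)]
      congr 1
      simp
      omega

lemma fw_eq (s : List Char) (t : Nat) (ht : t < s.length) :
    PySem.List.slice (s ++ s ++ s) (some ((s.length : Int) + (t : Int) + 1))
        (some ((s.length : Int) + (t : Int) + (s.length : Int)))
      = (List.range (s.length - 1)).map (fun j => s.getD ((t+1+j) % s.length) ' ') := by
  have e1 : ((s.length : Int) + (t : Int) + 1) = ((s.length + t + 1 : Nat) : Int) := by push_cast; ring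
  have e2 : ((s.length : Int) + (t : Int) + (s.length : Int)) = ((s.length + t + s.length : Nat) : Int) := by push_cast; ring
  rw [e1, e2, PySem.List.slice_natCast,
    show s.length + t + s.length - (s.length + t + 1) = s.length - 1 by omega,
    seg _ _ _ (by simp; omega)]
  refine List.map_congr_left (fun j hj => ?_)
  have hj' : j < s.length - 1 := List.mem_range.mp hj
  rw [tripleGetD _ _ (by omega), show s.length + t + 1 + j = s.length + (t+1+j) by omega,
    Nat.add_mod_left]

lemma bw_eq (s : List Char) (t : Nat) (ht : t < s.length) :
    (PySem.List.slice (s ++ s ++ s) (some ((s.length : Int) + (t : Int) - (s.length : Int) + 1))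
        (some ((s.length : Int) + (t : Int)))).reverse
      = (List.range (s.length - 1)).map (fun j => s.getD ((2*t + s.length - t - 1 - j) % s.length) ' ') := by
  have e1 : ((s.length : Int) + (t : Int) - (s.length : Int) + 1) = ((t + 1 : Nat) : Int) := by push_cast; ring
  have e2 : ((s.length : Int) + (t : Int)) = ((s.length + t : Nat) : Int) := by push_cast; ring
  rw [e1, e2, PySem.List.slice_natCast,
    show s.length + t - (t + 1) = s.length - 1 by omega,
    segrev _ _ _ (by simp; omega)]
  refine List.map_congr_left (fun j hj => ?_)
  have hj' : j < s.length - 1 := List.mem_range.mp hj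
  rw [tripleGetD _ _ (by omega),
    show t + 1 + (s.length - 1 - 1 - j) = 2*t + s.length - t - 1 - j by omega]

lemma obw_eq (s : List Char) (t : Nat) (ht : t < s.length) :
    (PySem.List.slice (s ++ s ++ s) (some ((s.length : Int) + (t : Int) - (s.length : Int) + 2))
        (some ((s.length : Int) + (t : Int) + 1))).reverse
      = (List.range (s.length - 1)).map (fun j => s.getD ((2*t + 1 + s.length - t - 1 - j) % s.length) ' ') := by
  have e1 : ((s.length : Int) + (t : Int) - (s.length : Int) + 2) = ((t + 2 : Nat) : Int) := by push_cast; ring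
  have e2 : ((s.length : Int) + (t : Int) + 1) = ((s.length + t + 1 : Nat) : Int) := by push_cast; ring
  rw [e1, e2, PySem.List.slice_natCast,
    show s.length + t + 1 - (t + 2) = s.length - 1 by omega,
    segrev _ _ _ (by simp; omega)]
  refine List.map_congr_left (fun j hj => ?_)
  have hj' : j < s.length - 1 := List.mem_range.mp hj
  rw [tripleGetD _ _ (by omega),
    show t + 2 + (s.length - 1 - 1 - j) = 2*t + 1 + s.length - t - 1 - j by omega]

lemma bodyB_eq (s : List Char) (occ : List Bool) (invs : List Int) (c : Int) :
    (let invs' := if PySem.List.pyGetD occ (PySem.Int.mod ((s.length : Int) - 1 - 2*c) (s.length : Int)) false then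
        invs ++ [PySem.Int.mod (2*c + 2) (2*(s.length : Int))] else invs
     if PySem.List.pyGetD occ (PySem.Int.mod ((s.length : Int) - 2 - 2*c) (s.length : Int)) false then
        invs' ++ [PySem.Int.mod (2*c + 3) (2*(s.length : Int))] else invs')
    = invs ++ emitB s occ c := by
  simp only [emitB]
  split_ifs <;> simp

lemma B_eq (string : String) :
    check_inversion_alt string = ((List.range string.toList.length).map
      (fun (t : Nat) => emitB string.toList (occList string.toList) (t : Int))).flatten := by
  unfold check_inversion_alt
  simp only []
  rw [PySem.List.pyRange_zero_nat, List.foldl_map]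
  simp only [bodyB_eq]
  rw [PySem.List.foldl_append_eq_flatMap]
  simp only [List.nil_append, List.flatMap_def]
  unfold occList
  rw [PySem.List.pyRange_zero_nat]

lemma symA (s : List Char) (t a : Nat) (ht : t < s.length) (hpar : a = 2*t ∨ a = 2*t+1) :
    (∀ j < s.length - 1, s.getD ((t+1+j) % s.length) ' ' = s.getD ((a + s.length - t - 1 - j) % s.length) ' ')
    ↔ (∀ x : ZMod s.length, s.getD x.val ' ' = s.getD (((a : Nat) : ZMod s.length) - x).val ' ') := by
  have hN : 0 < s.length := by omega
  haveI : NeZero s.length := ⟨by omega⟩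
  have ha : t ≤ a := by omega
  -- idx2 computation, shared
  have idx2 : ∀ j : Nat, j < s.length - 1 →
      (a + s.length - t - 1 - j) % s.length
        = (((a : Nat) : ZMod s.length) - ((t+1+j : Nat) : ZMod s.length)).val := by
    intro j hj
    have hA2 : (a + s.length - t - 1 - j) + (t+1+j) = a + s.length := by omega
    have hc : ((a + s.length - t - 1 - j : Nat) : ZMod s.length)
        = ((a : Nat) : ZMod s.length) - ((t+1+j : Nat) : ZMod s.length) := by
      have := congrArg (fun m : Nat => (m : ZMod s.length)) hA2
      push_cast [ZMod.natCast_self] at this ⊢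
      linear_combination this
    rw [← ZMod.val_natCast, hc]
  have idx1 : ∀ j : Nat, (t+1+j) % s.length = ((t+1+j : Nat) : ZMod s.length).val := by
    intro j; rw [ZMod.val_natCast]
  constructor
  · intro h x
    by_cases hx : x = ((t : Nat) : ZMod s.length)
    · rcases hpar with rfl | rfl
      · have : ((2*t : Nat) : ZMod s.length) - x = x := by
          rw [hx]; push_cast; ring
        rw [this]
      · by_cases hN1 : s.length = 1
        · have h1 := ZMod.val_lt x
          have h2 := ZMod.val_lt (((2*t+1 : Nat) : ZMod s.length) - x)
          rw [show x.val = 0 by omega, show (((2*t+1 : Nat) : ZMod s.length) - x).val = 0 by omega]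
        · have h0 := h 0 (by omega)
          have e1 : (t+1+0) % s.length = ((t+1+0 : Nat) : ZMod s.length).val := idx1 0
          have e2 : (2*t+1 + s.length - t - 1 - 0) % s.length = t := by
            rw [show 2*t+1 + s.length - t - 1 - 0 = s.length + t by omega, Nat.add_mod_left,
              Nat.mod_eq_of_lt ht]
          rw [e1, e2] at h0
          have ex : ((2*t+1 : Nat) : ZMod s.length) - x = ((t+1+0 : Nat) : ZMod s.length) := by
            rw [hx]; push_cast; ring
          rw [ex, hx, ZMod.val_cast_of_lt ht]
          exact h0.symm
    · set j := (x - ((t : Nat) : ZMod s.length) - 1).val with hjdef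
      have hjx : ((j : Nat) : ZMod s.length) = x - ((t : Nat) : ZMod s.length) - 1 :=
        ZMod.natCast_zmod_val _
      have hjlt : j < s.length := ZMod.val_lt _
      have hjne : j ≠ s.length - 1 := by
        intro hje
        apply hx
        have : ((j : Nat) : ZMod s.length) = ((s.length - 1 : Nat) : ZMod s.length) := by rw [hje]
        rw [hjx] at this
        rw [Nat.cast_sub (by omega), ZMod.natCast_self] at this
        have : x = ((t : Nat) : ZMod s.length) := by linear_combination this
        exact this
      have hxj : ((t+1+j : Nat) : ZMod s.length) = x := by
        push_cast [hjx]; ring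
      have h1 := h j (by omega)
      rw [idx1 j, hxj, idx2 j (by omega), hxj] at h1
      exact h1
  · intro h j hj
    have h1 := h ((t+1+j : Nat) : ZMod s.length)
    rw [← idx1 j, ← idx2 j hj] at h1
    exact h1

lemma dblGetD (u : List Char) (m : Nat) (h : m < 2*u.length) :
    (u ++ u).getD m ' ' = u.getD (m % u.length) ' ' := by
  have hN : 0 < u.length := by omega
  by_cases h1 : m < u.length
  · rw [Nat.mod_eq_of_lt h1, List.getD_append _ _ _ _ h1]
  · rw [List.getD_append_right _ _ _ _ (by omega), Nat.mod_eq_sub_mod (by omega),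
      Nat.mod_eq_of_lt (by omega)]

lemma revGetD (s : List Char) (k : Nat) (hk : k < s.length) :
    s.reverse.getD k ' ' = s.getD (s.length-1-k) ' ' := by
  rw [List.getD_eq_getElem?_getD, List.getD_eq_getElem?_getD,
    List.getElem?_eq_getElem (by simpa using hk), List.getElem?_eq_getElem (by omega)]
  simp [List.getElem_reverse]

lemma list_eq_iff (u v : List Char) (h : u.length = v.length) :
    u = v ↔ ∀ i < u.length, u.getD i ' ' = v.getD i ' ' := by
  constructor
  · intro he i _; rw [he]
  · intro hp
    apply List.ext_getElem h
    intro i h1 h2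
    have := hp i h1
    rw [List.getD_eq_getElem?_getD, List.getD_eq_getElem?_getD,
      List.getElem?_eq_getElem h1, List.getElem?_eq_getElem h2] at this
    simpa using this

lemma symB (s : List Char) (a dN : Nat) (hN : 0 < s.length) (hd : dN < s.length)
    (hcast : ((dN : Nat) : ZMod s.length) = -1 - ((a : Nat) : ZMod s.length)) :
    (((s.reverse ++ s.reverse).drop dN).take s.length = s)
    ↔ (∀ x : ZMod s.length, s.getD x.val ' ' = s.getD (((a : Nat) : ZMod s.length) - x).val ' ') := by
  haveI : NeZero s.length := ⟨by omega⟩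
  have hlen : (((s.reverse ++ s.reverse).drop dN).take s.length).length = s.length := by
    simp; omega
  rw [list_eq_iff _ _ (by rw [hlen]), hlen]
  have hget : ∀ i, i < s.length →
      (((s.reverse ++ s.reverse).drop dN).take s.length).getD i ' '
        = s.getD (s.length - 1 - (dN + i) % s.length) ' ' := by
    intro i hi
    rw [seg _ _ _ (by simp; omega), PySem.List.getD_map_range _ _ _ _ hi,
      dblGetD _ _ (by simp; omega)]
    rw [List.length_reverse] at *
    rw [revGetD _ _ (Nat.mod_lt _ hN)]
  have keyw : ∀ i : Nat, i < s.length →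
      s.length - 1 - (dN + i) % s.length = (((a : Nat) : ZMod s.length) - ((i : Nat) : ZMod s.length)).val := by
    intro i hi
    have hv : (dN + i) % s.length < s.length := Nat.mod_lt _ hN
    have hA2 : (s.length - 1 - (dN + i) % s.length) + (dN + i) % s.length = s.length - 1 := by omega
    have hc : ((s.length - 1 - (dN + i) % s.length : Nat) : ZMod s.length)
        = ((a : Nat) : ZMod s.length) - ((i : Nat) : ZMod s.length) := by
      have h1 := congrArg (fun m : Nat => (m : ZMod s.length)) hA2
      simp only [] at h1
      have h3 : ((s.length - 1 : Nat) : ZMod s.length) = -1 := by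
        rw [Nat.cast_sub (by omega), ZMod.natCast_self]
        ring
      rw [h3, Nat.cast_add, ZMod.natCast_mod, Nat.cast_add, hcast] at h1
      linear_combination h1
    have hv2 : (((s.length - 1 - (dN + i) % s.length) : Nat) : ZMod s.length).val
        = s.length - 1 - (dN + i) % s.length := ZMod.val_cast_of_lt (by omega)
    rw [← hv2, hc]
  constructor
  · intro h x
    have h1 := h x.val (ZMod.val_lt x)
    rw [hget _ (ZMod.val_lt x), keyw _ (ZMod.val_lt x), ZMod.natCast_zmod_val] at h1
    exact h1.symm
  · intro h i hi
    have h1 := (h ((i : Nat) : ZMod s.length)).symm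
    rw [ZMod.val_cast_of_lt hi] at h1
    rw [hget _ hi, keyw _ hi]
    exact h1

lemma intmod_toNat (N : Nat) (hN : 0 < N) (b : Int) (a : Nat) (h : b = (a : Int) - N - N) :
    PySem.Int.mod b (N : Int) = ((a % N : Nat) : Int) := by
  rw [PySem.Int.mod_eq_emod_of_pos (by omega), h, Int.sub_emod_right, Int.sub_emod_right]
  push_cast
  ring_nf

lemma val1 (N t : Nat) (ht : t < N) :
    (if 2*((t:Int)+1) < (N:Int)*2 then 2*((t:Int)+1) else 2*((t:Int)+1) - (N:Int)*2)
      = PySem.Int.mod (2*(t:Int)+2) (2*(N:Int)) := by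
  rw [PySem.Int.mod_eq_emod_of_pos (by omega)]
  split_ifs with h
  · rw [Int.emod_eq_of_lt (by omega) (by omega)]; ring
  · rw [show (2*(t:Int)+2) = 2*(N:Int) by omega, Int.emod_self]; omega

lemma val2 (N t : Nat) (ht : t < N) :
    (if 2*((t:Int)+1)+1 < (N:Int)*2 then 2*((t:Int)+1)+1 else 2*((t:Int)+1)+1 - (N:Int)*2)
      = PySem.Int.mod (2*(t:Int)+3) (2*(N:Int)) := by
  rw [PySem.Int.mod_eq_emod_of_pos (by omega)]
  split_ifs with h
  · rw [Int.emod_eq_of_lt (by omega) (by omega)]; ring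
  · rw [show (2*(t:Int)+3) = 1 + 2*(N:Int)*1 by omega, Int.add_mul_emod_self_left,
      Int.emod_eq_of_lt (by omega) (by omega)]
    omega

lemma emit_eq (s : List Char) (t : Nat) (ht : t < s.length) :
    emitA s t = emitB s (occList s) (t : Int) := by
  have hN : 0 < s.length := by omega
  haveI : NeZero s.length := ⟨by omega⟩
  unfold emitA emitA' emitB occList
  simp only []
  rw [fw_eq s t ht, bw_eq s t ht, obw_eq s t ht, val1 s.length t ht, val2 s.length t ht]
  rw [intmod_toNat s.length hN _ (3*s.length-1-2*t) (by omega),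
    intmod_toNat s.length hN _ (3*s.length-2-2*t) (by omega)]
  rw [PySem.List.pyGetD_map_pyRange_of_nonneg _ _ _ _ (Int.natCast_nonneg _)
      (by exact_mod_cast Nat.mod_lt _ hN),
    PySem.List.pyGetD_map_pyRange_of_nonneg _ _ _ _ (Int.natCast_nonneg _)
      (by exact_mod_cast Nat.mod_lt _ hN)]
  rw [show (((((3*s.length-1-2*t) % s.length : Nat)) : Int) + (s.length : Int))
      = (((3*s.length-1-2*t) % s.length + s.length : Nat) : Int) by push_cast; ring,
    show (((((3*s.length-2-2*t) % s.length : Nat)) : Int) + (s.length : Int))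
      = (((3*s.length-2-2*t) % s.length + s.length : Nat) : Int) by push_cast; ring]
  rw [PySem.List.slice_natCast, PySem.List.slice_natCast,
    show (3*s.length-1-2*t) % s.length + s.length - (3*s.length-1-2*t) % s.length = s.length by omega,
    show (3*s.length-2-2*t) % s.length + s.length - (3*s.length-2-2*t) % s.length = s.length by omega]
  have hcast1 : (((3*s.length-1-2*t) % s.length : Nat) : ZMod s.length)
      = -1 - ((2*t : Nat) : ZMod s.length) := by
    rw [ZMod.natCast_mod, Nat.cast_sub (by omega), Nat.cast_sub (by omega)]
    push_cast [ZMod.natCast_self]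
    ring
  have hcast2 : (((3*s.length-2-2*t) % s.length : Nat) : ZMod s.length)
      = -1 - ((2*t+1 : Nat) : ZMod s.length) := by
    rw [ZMod.natCast_mod, Nat.cast_sub (by omega), Nat.cast_sub (by omega)]
    push_cast [ZMod.natCast_self]
    ring
  have hc1 : ((List.range (s.length-1)).map (fun j => s.getD ((t+1+j) % s.length) ' ')
        = (List.range (s.length-1)).map (fun j => s.getD ((2*t + s.length - t - 1 - j) % s.length) ' '))
      ↔ ((((s.reverse ++ s.reverse).drop ((3*s.length-1-2*t) % s.length)).take s.length == s) = true) := by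
    rw [beq_iff_eq, symB s (2*t) _ hN (Nat.mod_lt _ hN) hcast1, List.map_eq_map_iff]
    simp only [List.mem_range]
    exact symA s t (2*t) ht (Or.inl rfl)
  have hc2 : ((List.range (s.length-1)).map (fun j => s.getD ((t+1+j) % s.length) ' ')
        = (List.range (s.length-1)).map (fun j => s.getD ((2*t + 1 + s.length - t - 1 - j) % s.length) ' '))
      ↔ ((((s.reverse ++ s.reverse).drop ((3*s.length-2-2*t) % s.length)).take s.length == s) = true) := by
    rw [beq_iff_eq, symB s (2*t+1) _ hN (Nat.mod_lt _ hN) hcast2, List.map_eq_map_iff]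
    simp only [List.mem_range]
    exact symA s t (2*t+1) ht (Or.inr rfl)
  rw [if_congr hc1 rfl rfl, if_congr hc2 rfl rfl]

-- ===== VERDICT (by name: the statement is the Claim_ definition above) =====
theorem check_inversion_spec : Claim_equal_check_inversion := by
  intro string _
  unfold Spec_check_inversion
  rw [A_eq, B_eq]
  congr 1
  exact List.map_congr_left (fun t htm => emit_eq string.toList t (List.mem_range.mp htm))
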